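-- pv_equiv track=rewrite | github.com/ggbbrr17/service | core/engine.py | get_relevant_memories
-- ===== SOURCE A (Python) =====
-- def get_relevant_memories(question: str, memories: list, limit: int = 15) -> str:
--     """
--     Filtra las memorias más relevantes para la pregunta actual.
--     Esto permite tener 'memoria ilimitada' seleccionando solo lo necesario.
--     """
--     if not memories:
--         return ""
--
--     # Extraer palabras clave de la pregunta (ignorando palabras cortas)
--     keywords = [w.lower() for w in question.split() if len(w) > 3]
--     if not keywords:
--         return "\n".join([f"- {r}" for r in memories[-limit:]])
--
--     # Puntuar memorias según coincidencia de palabras clave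
--     scored_memories = []
--     for m in memories:
--         score = sum(1 for k in keywords if k in m.lower())
--         scored_memories.append((score, m))
--
--     # Ordenar por relevancia y tomar las mejores
--     scored_memories.sort(key=lambda x: x[0], reverse=True)
--     top_memories = [m for score, m in scored_memories[:limit]]
--     return "\n".join([f"- {r}" for r in top_memories])
-- ===== SOURCE B (Python) =====
-- def _bullets(lines):
--     return "\n".join("- " + r for r in lines)
--
--
-- def _score(keywords, m):
--     ml = m.lower()
--     return sum(1 for k in keywords if k in ml)
--
--
-- def get_relevant_memories(question: str, memories: list, limit: int = 15) -> str:
--     """Staged selection: sweep the score levels from highest to lowest and pick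
--     the memories of each exact level in original order, instead of building
--     (score, memory) tuples and comparison-sorting them descending."""
--     if not memories:
--         return ""
--     keywords = [w.lower() for w in question.split() if len(w) > 3]
--     if not keywords:
--         return _bullets(memories[-limit:])
--     top = [m for s in range(len(keywords), -1, -1)
--              for m in memories if _score(keywords, m) == s]
--     return _bullets(top[:limit])
-- ===== Notes on version B (the rewrite author's own statement) =====
-- stated objective: alternative
-- what changed: Replaces building (score, memory) tuples, stable comparison-sorting them descending and slicing, by a staged sweep over the score levels len(keywords)..0: one filtering pass per exact score level, concatenated high-to-low, then sliced; no tuples and no sort.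
import Mathlib
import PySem

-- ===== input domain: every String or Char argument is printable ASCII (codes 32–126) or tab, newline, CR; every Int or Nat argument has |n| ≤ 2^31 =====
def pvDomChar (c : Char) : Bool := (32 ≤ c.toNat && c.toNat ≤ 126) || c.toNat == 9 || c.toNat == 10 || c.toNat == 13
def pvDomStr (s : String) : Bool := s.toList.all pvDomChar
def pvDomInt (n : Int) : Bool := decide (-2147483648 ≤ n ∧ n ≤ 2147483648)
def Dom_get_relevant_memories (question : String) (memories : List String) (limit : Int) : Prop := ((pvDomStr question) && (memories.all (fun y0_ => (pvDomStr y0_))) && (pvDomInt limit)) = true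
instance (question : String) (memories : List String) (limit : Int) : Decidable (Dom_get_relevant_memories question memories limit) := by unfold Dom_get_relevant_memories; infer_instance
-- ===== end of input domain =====

-- B replaces A's build-tuples + stable descending comparison sort + slice by a staged sweep
-- over the score levels K..0, filtering the memories of each exact level in order (objective: alternative).


-- ===== PORT A =====
def get_relevant_memories (question : String) (memories : List String) (limit : Int) : String :=
  if memories = [] then ""
  else
    -- keywords = [w.lower() for w in question.split() if len(w) > 3]
    let keywords := ((PySem.Str.split₀ question).filter (fun w => decide (3 < PySem.Str.len w))).map PySem.Str.lower
    if keywords = [] then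
      PySem.Str.join "\n" ((PySem.List.slice memories (some (-limit)) none).map (fun r => "- " ++ r))
    else
      -- for m in memories: score = sum(1 for k in keywords if k in m.lower()); scored.append((score, m))
      let scored := memories.foldl (fun acc m =>
        let score : Int := keywords.foldl (fun n k => if PySem.Str.isIn k (PySem.Str.lower m) then n + 1 else n) 0
        acc ++ [(score, m)]) []
      -- scored.sort(key=lambda x: x[0], reverse=True)
      let sortedScored := PySem.List.sorted scored (fun x => x.1) true
      -- top = [m for score, m in scored[:limit]]
      let top := (PySem.List.slice sortedScored none (some limit)).map (fun x => x.2)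
      PySem.Str.join "\n" (top.map (fun r => "- " ++ r))

-- ===== PORT B =====
-- "\n".join("- " + r for r in lines)
def pvBullets (lines : List String) : String :=
  PySem.Str.join "\n" (lines.map (fun r => "- " ++ r))

-- _score(keywords, m) = sum(1 for k in keywords if k in m.lower())  (a 0/1-sum = countP)
def pvScore (keywords : List String) (m : String) : Nat :=
  keywords.countP (fun k => PySem.Str.isIn k (PySem.Str.lower m))

def get_relevant_memories_alt (question : String) (memories : List String) (limit : Int) : String :=
  if memories = [] then ""
  else
    let keywords := ((PySem.Str.split₀ question).filter (fun w => decide (3 < PySem.Str.len w))).map PySem.Str.lower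
    if keywords = [] then pvBullets (PySem.List.slice memories (some (-limit)) none)
    else
      -- top = [m for s in range(len(keywords), -1, -1) for m in memories if _score(keywords, m) == s]
      let top := (PySem.List.pyRange (keywords.length : Int) (-1) (-1)).flatMap
        (fun s => memories.filter (fun m => decide ((pvScore keywords m : Int) = s)))
      pvBullets (PySem.List.slice top none (some limit))

-- ===== PRECONDITION & SPEC =====
def Spec_get_relevant_memories (question : String) (memories : List String) (limit : Int) (out : String) : Prop := out = get_relevant_memories_alt question memories limit
instance (question : String) (memories : List String) (limit : Int) (out : String) : Decidable (Spec_get_relevant_memories question memories limit out) := by unfold Spec_get_relevant_memories; infer_instance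

-- ===== CLAIM (what is proved, stated in full; the proofs are below) =====
def Claim_equal_get_relevant_memories : Prop := ∀ (question : String) (memories : List String) (limit : Int), Dom_get_relevant_memories question memories limit → Spec_get_relevant_memories question memories limit (get_relevant_memories question memories limit)

-- ===== LEMMAS AND PROOFS =====

-- insertBy passes over a prefix none of whose elements satisfy `before x ·`.
theorem pv_insertBy_skip {α : Type} (before : α → α → Bool) (x : α) (pre post : List α)
    (h : ∀ y ∈ pre, before x y = false) :
    PySem.List.insertBy before x (pre ++ post) = pre ++ PySem.List.insertBy before x post := by
  induction pre with
  | nil => simp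
  | cons y ys ih =>
      have hy : before x y = false := h y (by simp)
      simp [PySem.List.insertBy, hy, ih (fun z hz => h z (by simp [hz]))]

-- insertBy puts x in front when every element (in particular the head) satisfies `before x ·`.
theorem pv_insertBy_front {α : Type} (before : α → α → Bool) (x : α) (post : List α)
    (h : ∀ y ∈ post, before x y = true) :
    PySem.List.insertBy before x post = x :: post := by
  cases post with
  | nil => simp [PySem.List.insertBy]
  | cons y ys => simp [PySem.List.insertBy, h y (by simp)]

-- One insertion step preserves the bucketed (score-descending) shape.
theorem pv_insert_step {α : Type} (key : α → Int) (x : α) (l : List α) (ss : List Int)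
    (hs : ss.Pairwise (· > ·)) (hx : key x ∈ ss) :
    PySem.List.insertBy (fun a b => decide (key b < key a)) x
        ((ss.map (fun s => l.filter (fun y => key y == s))).flatten)
      = ((ss.map (fun s => (l ++ [x]).filter (fun y => key y == s))).flatten) := by
  induction ss with
  | nil => simp at hx
  | cons s ss' ih =>
      have hgt : ∀ s' ∈ ss', s > s' := by
        intro s' hs'; exact (List.pairwise_cons.mp hs).1 s' hs'
      by_cases hxs : key x = s
      · have hskip : ∀ y ∈ l.filter (fun y => key y == s), (fun a b => decide (key b < key a)) x y = false := by
          intro y hy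
          have : key y = s := by simpa using (List.of_mem_filter hy)
          simp [this, hxs]
        have hfront : ∀ y ∈ (ss'.map (fun s => l.filter (fun y => key y == s))).flatten,
            (fun a b => decide (key b < key a)) x y = true := by
          intro y hy
          rcases List.mem_flatten.mp hy with ⟨c, hc, hyc⟩
          rcases List.mem_map.mp hc with ⟨s', hs', rfl⟩
          have hy' : key y = s' := by simpa using (List.of_mem_filter hyc)
          have : key y < key x := by rw [hy', hxs]; exact hgt s' hs'
          simpa using this
        have hnot : ∀ s' ∈ ss', ((l ++ [x]).filter (fun y => key y == s')) = l.filter (fun y => key y == s') := by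
          intro s' hs'
          have : key x ≠ s' := by rw [hxs]; exact ne_of_gt (hgt s' hs')
          simp [List.filter_append, this]
        calc PySem.List.insertBy (fun a b => decide (key b < key a)) x
              (((s :: ss').map (fun s => l.filter (fun y => key y == s))).flatten)
            = l.filter (fun y => key y == s) ++
                PySem.List.insertBy (fun a b => decide (key b < key a)) x
                  ((ss'.map (fun s => l.filter (fun y => key y == s))).flatten) := by
              simpa using pv_insertBy_skip _ x _ _ hskip
          _ = l.filter (fun y => key y == s) ++
                (x :: (ss'.map (fun s => l.filter (fun y => key y == s))).flatten) := by
              rw [pv_insertBy_front _ x _ hfront]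
          _ = (((s :: ss').map (fun s => (l ++ [x]).filter (fun y => key y == s))).flatten) := by
              have htail : (ss'.map (fun s' => (l ++ [x]).filter (fun y => key y == s')))
                  = ss'.map (fun s' => l.filter (fun y => key y == s')) :=
                List.map_congr_left hnot
              rw [List.map_cons, List.flatten_cons, htail, List.filter_append]
              simp [hxs]
      · have hx' : key x ∈ ss' := by
          rcases List.mem_cons.mp hx with h | h
          · exact absurd h hxs
          · exact h
        have hskip : ∀ y ∈ l.filter (fun y => key y == s), (fun a b => decide (key b < key a)) x y = false := by
          intro y hy
          have hy' : key y = s := by simpa using (List.of_mem_filter hy)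
          have : ¬ key y < key x := by
            rw [hy']; exact not_lt.mpr (le_of_lt (hgt _ hx'))
          simpa using this
        have hhead : ((l ++ [x]).filter (fun y => key y == s)) = l.filter (fun y => key y == s) := by
          simp [List.filter_append, hxs]
        calc PySem.List.insertBy (fun a b => decide (key b < key a)) x
              (((s :: ss').map (fun s => l.filter (fun y => key y == s))).flatten)
            = l.filter (fun y => key y == s) ++
                PySem.List.insertBy (fun a b => decide (key b < key a)) x
                  ((ss'.map (fun s => l.filter (fun y => key y == s))).flatten) := by
              simpa using pv_insertBy_skip _ x _ _ hskip
          _ = (((s :: ss').map (fun s => (l ++ [x]).filter (fun y => key y == s))).flatten) := by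
              rw [ih (List.pairwise_cons.mp hs).2 hx']
              simp [hxs]

-- A's stable reverse sort equals the concatenation of the score buckets (scores listed descending).
theorem pv_sorted_rev_eq_flatten {α : Type} (key : α → Int) (l : List α) (ss : List Int)
    (hs : ss.Pairwise (· > ·)) (hl : ∀ x ∈ l, key x ∈ ss) :
    PySem.List.sorted l key true = ((ss.map (fun s => l.filter (fun y => key y == s))).flatten) := by
  rw [PySem.List.sorted_rev_eq_foldl_insertBy]
  induction l using List.reverseRecOn with
  | nil => simp
  | append_singleton l x ih =>
      rw [List.foldl_append]
      simp only [List.foldl_cons, List.foldl_nil]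
      rw [ih (fun y hy => hl y (by simp [hy]))]
      exact pv_insert_step key x l ss hs (hl x (by simp))

-- slicing a prefix commutes with map
theorem pv_slice_map {α β : Type} (f : α → β) (l : List α) (b : Int) :
    PySem.List.slice (l.map f) none (some b) = (PySem.List.slice l none (some b)).map f := by
  simp [PySem.List.slice, PySem.List.clampIdx]

-- B's countdown range(K, -1, -1) is the descending integer list K, K-1, …, 0.
theorem pv_pyRange_countdown (K : ℕ) :
    PySem.List.pyRange (K : Int) (-1) (-1)
      = (((List.range (K + 1)).map (fun n : ℕ => (n : Int))).reverse) := by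
  rw [PySem.List.pyRange_neg_one]
  apply List.ext_getElem
  · simp
  · intro i h1 h2
    simp only [List.getElem_map, List.getElem_range, List.getElem_reverse,
      List.length_map, List.length_range]
    have hi : i < K + 1 := by simpa using h2
    have h3 : K + 1 - 1 - i = K - i := by omega
    rw [h3, Nat.cast_sub (by omega)]

-- the descending score list 0..K reversed is strictly decreasing (as Ints)
theorem pv_desc_pairwise (K : ℕ) :
    (((List.range (K + 1)).map (fun n : ℕ => (n : Int))).reverse).Pairwise (· > ·) := by
  rw [List.pairwise_reverse]
  refine List.Pairwise.map _ (fun a b h => ?_) List.pairwise_lt_range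
  exact_mod_cast h

theorem get_relevant_memories_eq_alt (question : String) (memories : List String) (limit : Int) :
    get_relevant_memories question memories limit = get_relevant_memories_alt question memories limit := by
  unfold get_relevant_memories get_relevant_memories_alt pvBullets
  by_cases hmem : memories = []
  · simp [hmem]
  · simp only [hmem, if_false]
    set keywords := ((PySem.Str.split₀ question).filter (fun w => decide (3 < PySem.Str.len w))).map PySem.Str.lower with hkw
    by_cases hk : keywords = []
    · simp [hk]
    · simp only [hk, if_false]
      set K := keywords.length with hK
      congr 1
      -- A's scored list is a map, with the per-element loop a countP (= pvScore)
      have hscored : memories.foldl (fun acc m =>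
            acc ++ [((keywords.foldl (fun n k => if PySem.Str.isIn k (PySem.Str.lower m) then n + 1 else n) 0 : Int), m)]) []
          = memories.map (fun m => ((pvScore keywords m : Int), m)) := by
        rw [PySem.List.foldl_append_singleton_eq_map]
        simp only [List.nil_append]
        apply List.map_congr_left
        intro m _
        rw [PySem.List.foldl_if_add_one]
        simp [pvScore]
      rw [hscored]
      set ss := (((List.range (K + 1)).map (fun n : ℕ => (n : Int))).reverse) with hss
      have hbound : ∀ m ∈ memories, pvScore keywords m ≤ K := by
        intro m _; exact le_trans List.countP_le_length (le_of_eq hK.symm)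
      have hmemss : ∀ x ∈ memories.map (fun m => ((pvScore keywords m : Int), m)), (fun p : Int × String => p.1) x ∈ ss := by
        intro x hx
        rcases List.mem_map.mp hx with ⟨m, hm, rfl⟩
        simp only [hss, List.mem_reverse, List.mem_map]
        exact ⟨pvScore keywords m, by simp [List.mem_range, Nat.lt_succ_of_le (hbound m hm)]⟩
      rw [pv_sorted_rev_eq_flatten (fun p : Int × String => p.1) (memories.map (fun m => ((pvScore keywords m : Int), m))) ss (pv_desc_pairwise K) hmemss]
      rw [← pv_slice_map]
      rw [pv_pyRange_countdown K, ← hss]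
      -- map snd of the flattened pair buckets is B's flatMap of string buckets
      have hXY : ((ss.map (fun s => ((memories.map (fun m => ((pvScore keywords m : Int), m))).filter (fun y => y.1 == s)))).flatten).map (fun x => x.2)
          = ss.flatMap (fun s => memories.filter (fun m => decide ((pvScore keywords m : Int) = s))) := by
        rw [List.flatMap_def, List.map_flatten, List.map_map]
        congr 1
        apply List.map_congr_left
        intro s _
        simp only [Function.comp]
        rw [List.filter_map, List.map_map]
        have hfeq : ((fun y : Int × String => y.1 == s) ∘ (fun m => ((pvScore keywords m : Int), m)))
            = fun m => decide ((pvScore keywords m : Int) = s) := by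
          funext m
          simp [Function.comp, BEq.beq]
        rw [hfeq]
        have hid : ((fun x : Int × String => x.2) ∘ (fun m => ((pvScore keywords m : Int), m))) = fun m => m := rfl
        rw [hid, List.map_id']
      rw [hXY]

-- ===== VERDICT (by name: the statement is the Claim_ definition above) =====
theorem get_relevant_memories_spec : Claim_equal_get_relevant_memories := by
  intro question memories limit _
  unfold Spec_get_relevant_memories
  exact get_relevant_memories_eq_alt question memories limit
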